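-- pv_equiv track=rewrite | github.com/hasankhadra/Provectus-Airflow | init_operator.py | pre_filter
-- ===== SOURCE A (Python) =====
-- import string
--
-- def pre_filter(data: list):
--     """
--     Prefilter the data. Delete all characters from the dataset except latin
--     letters and spaces. Then, split the dataset into separate words by spaces.
--     :return: list containing the filtered text and split into single words
--     """
--
--     filtered_data = []
--     for row in data:
--
--         new_row = row.split(",")
--         for item in new_row:
--             new_item = ""
--
--             # Filter latin letters
--             for character in item:
--                 if character in string.ascii_lowercase or character == " " or character in string.ascii_uppercase:
--                     new_item += character
--
--             # strip and then split by spaces and endlines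
--             new_item = new_item.strip().split()
--
--             for x in new_item:
--                 filtered_data.append(x)
--     return filtered_data
-- ===== SOURCE B (Python) =====
-- import string
--
-- # one translation table: ',' becomes a space, every other non-letter non-space
-- # ASCII character is deleted; then one whitespace split per row
-- _TABLE = str.maketrans(",", " ", "".join(
--     chr(i) for i in range(128) if chr(i) not in string.ascii_letters + " ,"))
--
--
-- def pre_filter(data: list):
--     words = []
--     for row in data:
--         words.extend(row.translate(_TABLE).split())
--     return words
-- ===== Notes on version B (the rewrite author's own statement) =====
-- stated objective: simpler
-- what changed: A's three nested loops (split each row on commas, rebuild each piece character by character keeping letters/spaces, then strip+split+append each word) are collapsed into one precomputed str.translate table (comma to space, other non-letter non-space ASCII deleted) and a single whitespace split per row.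
import Mathlib
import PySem

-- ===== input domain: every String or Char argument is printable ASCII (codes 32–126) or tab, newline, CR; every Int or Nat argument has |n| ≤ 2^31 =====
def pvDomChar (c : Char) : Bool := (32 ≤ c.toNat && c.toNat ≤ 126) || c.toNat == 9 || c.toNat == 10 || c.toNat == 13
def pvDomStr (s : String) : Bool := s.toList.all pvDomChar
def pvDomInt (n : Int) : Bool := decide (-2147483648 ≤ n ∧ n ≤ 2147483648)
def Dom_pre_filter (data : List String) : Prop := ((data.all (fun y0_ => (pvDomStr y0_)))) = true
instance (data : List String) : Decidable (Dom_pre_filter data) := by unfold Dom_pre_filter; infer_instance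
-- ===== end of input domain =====

-- B replaces A's split-on-comma loop with per-character string building by ONE per-character
-- translation of the row (comma → space, any other non-letter non-space deleted) followed by
-- a single whitespace split per row (objective: simpler/idiomatic; equal output proved on Dom).

-- ===== PORT A =====
-- string.ascii_lowercase / string.ascii_uppercase
def pvLower : List Char := ['a', 'b', 'c', 'd', 'e', 'f', 'g', 'h', 'i', 'j', 'k', 'l', 'm', 'n', 'o', 'p', 'q', 'r', 's', 't', 'u', 'v', 'w', 'x', 'y', 'z']
def pvUpper : List Char := ['A', 'B', 'C', 'D', 'E', 'F', 'G', 'H', 'I', 'J', 'K', 'L', 'M', 'N', 'O', 'P', 'Q', 'R', 'S', 'T', 'U', 'V', 'W', 'X', 'Y', 'Z']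
-- 'character in string.ascii_lowercase or character == " " or character in string.ascii_uppercase'
def pvKeepA (c : Char) : Bool :=
  PySem.Chars.isIn [c] pvLower || c == ' ' || PySem.Chars.isIn [c] pvUpper

def pre_filter (data : List String) : List String :=
  data.foldl (fun filtered_data row =>
    -- row.split(",")  (PySem.Chars.splitOn is str.split with the non-empty separator ",")
    (PySem.Chars.splitOn row.toList [',']).foldl (fun fd item =>
      -- new_item built character by character
      let new_item := item.foldl (fun acc c => if pvKeepA c then acc ++ [c] else acc) ([] : List Char)
      -- new_item.strip().split()
      let words := PySem.Chars.split₀ (PySem.Chars.strip new_item)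
      words.foldl (fun fd2 x => fd2 ++ [String.ofList x]) fd) filtered_data) []

-- ===== PORT B =====
-- string.ascii_letters + " ,"
def pvLetterSpaceComma : List Char := pvLower ++ pvUpper ++ [' ', ',']
-- str.maketrans(",", " ", <ASCII chars not in ascii_letters + " ,">), applied per character:
-- ',' maps to ' ', any other ASCII character outside ascii_letters + " " is deleted
def pvTranslate (c : Char) : Option Char :=
  if c == ',' then some ' '
  else if c.toNat < 128 && !(pvLetterSpaceComma.contains c) then none
  else some c

def pre_filter_alt (data : List String) : List String :=
  data.foldl (fun words row =>
    -- row.translate(_TABLE).split()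
    words ++ (PySem.Chars.split₀ (row.toList.filterMap pvTranslate)).map String.ofList) []

-- ===== PRECONDITION & SPEC =====
def Spec_pre_filter (data : List String) (out : List String) : Prop := out = pre_filter_alt data
instance (data : List String) (out : List String) : Decidable (Spec_pre_filter data out) := by unfold Spec_pre_filter; infer_instance

-- ===== CLAIM (what is proved, stated in full; the proofs are below) =====
def Claim_equal_pre_filter : Prop := ∀ (data : List String), Dom_pre_filter data → Spec_pre_filter data (pre_filter data)

-- ===== LEMMAS AND PROOFS =====

-- pvSplitP cs = (first comma-separated piece of cs, the later pieces)
def pvSplitP : List Char → List Char × List (List Char)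
  | [] => ([], [])
  | c :: cs =>
    let p := pvSplitP cs
    if c = ',' then ([], p.1 :: p.2) else (c :: p.1, p.2)

-- ---- facts about whitespace splitting (split₀.go) ----
theorem pv_go_acc (s : List Char) : ∀ (cur : List Char) (acc : List (List Char)),
    PySem.Chars.split₀.go s cur acc = acc.reverse ++ PySem.Chars.split₀.go s cur [] := by
  induction s with
  | nil =>
    intro cur acc
    simp only [PySem.Chars.split₀.go]
    split <;> simp
  | cons c s ih =>
    intro cur acc
    simp only [PySem.Chars.split₀.go]
    split
    · split
      · exact ih _ _
      · rw [ih [] (cur.reverse :: acc), ih [] [cur.reverse]]; simp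
    · exact ih _ _

theorem pv_go_ws (ws : List Char) : ∀ (cur : List Char) (acc : List (List Char)),
    (∀ c ∈ ws, PySem.Chars.isspace c = true) →
    PySem.Chars.split₀.go ws cur acc = PySem.Chars.split₀.go [] cur acc := by
  induction ws with
  | nil => intro cur acc _; rfl
  | cons c ws ih =>
    intro cur acc h
    have hc : PySem.Chars.isspace c = true := h c (by simp)
    have h' : ∀ d ∈ ws, PySem.Chars.isspace d = true := fun d hd => h d (by simp [hd])
    simp only [PySem.Chars.split₀.go, hc, if_true]
    split
    · rename_i hcur
      rw [ih [] acc h']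
      simp only [List.isEmpty_iff] at hcur
      simp [PySem.Chars.split₀.go]
    · rename_i hcur
      rw [ih [] (cur.reverse :: acc) h']
      simp [PySem.Chars.split₀.go]

theorem pv_go_append_ws (ws : List Char) (hws : ∀ c ∈ ws, PySem.Chars.isspace c = true)
    (xs : List Char) : ∀ (cur : List Char) (acc : List (List Char)),
    PySem.Chars.split₀.go (xs ++ ws) cur acc = PySem.Chars.split₀.go xs cur acc := by
  induction xs with
  | nil => intro cur acc; simpa using pv_go_ws ws cur acc hws
  | cons c xs ih =>
    intro cur acc
    simp only [List.cons_append, PySem.Chars.split₀.go]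
    split
    · split
      · exact ih _ _
      · exact ih _ _
    · exact ih _ _

theorem pv_go_append_space (ys xs : List Char) : ∀ (cur : List Char) (acc : List (List Char)),
    PySem.Chars.split₀.go (xs ++ ' ' :: ys) cur acc
      = PySem.Chars.split₀.go xs cur acc ++ PySem.Chars.split₀.go ys [] [] := by
  induction xs with
  | nil =>
    intro cur acc
    have hsp : PySem.Chars.isspace ' ' = true := by decide
    simp only [List.nil_append, PySem.Chars.split₀.go, hsp, if_true]
    split <;> exact pv_go_acc ys [] _
  | cons c xs ih =>
    intro cur acc
    simp only [List.cons_append, PySem.Chars.split₀.go]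
    split
    · split
      · exact ih _ _
      · exact ih _ _
    · exact ih _ _

theorem pv_split₀_append_space (xs ys : List Char) :
    PySem.Chars.split₀ (xs ++ ' ' :: ys) = PySem.Chars.split₀ xs ++ PySem.Chars.split₀ ys := by
  simpa [PySem.Chars.split₀] using pv_go_append_space ys xs [] []

theorem pv_split₀_strip (xs : List Char) :
    PySem.Chars.split₀ (PySem.Chars.strip xs) = PySem.Chars.split₀ xs := by
  have hl : ∀ ys : List Char,
      PySem.Chars.split₀ (PySem.Chars.lstrip ys) = PySem.Chars.split₀ ys := by
    intro ys
    induction ys with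
    | nil => rfl
    | cons c ys ih =>
      by_cases hc : PySem.Chars.isspace c = true
      · rw [show PySem.Chars.lstrip (c :: ys) = PySem.Chars.lstrip ys by
            simp [PySem.Chars.lstrip, hc], ih]
        show PySem.Chars.split₀ ys = PySem.Chars.split₀.go (c :: ys) [] []
        simp [PySem.Chars.split₀, PySem.Chars.split₀.go, hc]
      · simp [PySem.Chars.lstrip, hc]
  have hr : PySem.Chars.split₀ (PySem.Chars.rstrip (PySem.Chars.lstrip xs))
      = PySem.Chars.split₀ (PySem.Chars.lstrip xs) := by
    set y := PySem.Chars.lstrip xs with hy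
    have hdecomp : y = PySem.Chars.rstrip y
        ++ (y.reverse.takeWhile PySem.Chars.isspace).reverse := by
      simp only [PySem.Chars.rstrip]
      rw [← List.reverse_append, List.takeWhile_append_dropWhile, List.reverse_reverse]
    have hws : ∀ c ∈ (y.reverse.takeWhile PySem.Chars.isspace).reverse,
        PySem.Chars.isspace c = true := by
      intro c hc
      rw [List.mem_reverse] at hc
      exact List.mem_takeWhile_imp hc
    conv_rhs => rw [hdecomp]
    simp only [PySem.Chars.split₀]
    rw [pv_go_append_ws _ hws]
  rw [PySem.Chars.strip, hr, hl]

-- ---- str.split(",") computes pvSplitP ----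
theorem pv_splitOn_go (l : List Char) : ∀ (fuel : Nat) (cur : List Char) (acc : List (List Char)),
    l.length < fuel →
    PySem.Chars.splitOn.go [','] fuel l cur acc
      = acc.reverse ++ (cur.reverse ++ (pvSplitP l).1) :: (pvSplitP l).2 := by
  induction l with
  | nil =>
    intro fuel cur acc h
    match fuel, h with
    | fuel + 1, _ => simp [PySem.Chars.splitOn.go, pvSplitP]
  | cons c rest ih =>
    intro fuel cur acc h
    match fuel, h with
    | fuel + 1, h =>
      have hf : rest.length < fuel := by simp at h; omega
      by_cases hc : c = ','
      · subst hc
        rw [show PySem.Chars.splitOn.go [','] (fuel + 1) (',' :: rest) cur acc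
            = PySem.Chars.splitOn.go [','] fuel rest [] (cur.reverse :: acc) by
          simp [PySem.Chars.splitOn.go, List.isPrefixOf]]
        rw [ih fuel [] (cur.reverse :: acc) hf]
        simp [pvSplitP]
      · rw [show PySem.Chars.splitOn.go [','] (fuel + 1) (c :: rest) cur acc
            = PySem.Chars.splitOn.go [','] fuel rest (c :: cur) acc by
          have hpre : [','].isPrefixOf (c :: rest) = false := by
            simp [List.isPrefixOf]
            exact fun h' => absurd h'.symm hc
          simp [PySem.Chars.splitOn.go, hpre]]
        rw [ih fuel (c :: cur) acc hf]
        simp [pvSplitP, hc]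

theorem pv_splitOn_comma (l : List Char) :
    PySem.Chars.splitOn l [','] = (pvSplitP l).1 :: (pvSplitP l).2 := by
  simpa [PySem.Chars.splitOn] using pv_splitOn_go l (l.length + 1) [] [] (by omega)

-- ---- per-character agreement of A's keep test and B's translation on ASCII ----
theorem pv_keepA_iff (c : Char) :
    pvKeepA c = true ↔ (c ∈ pvLower ∨ c = ' ' ∨ c ∈ pvUpper) := by
  simp only [pvKeepA, Bool.or_eq_true, beq_iff_eq, PySem.Chars.isIn_iff_infix,
    List.singleton_infix_iff]
  tauto

theorem pv_translate_keep (c : Char) (hc : c ≠ ',') (hk : pvKeepA c = true) :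
    pvTranslate c = some c := by
  have hmem : c ∈ pvLetterSpaceComma := by
    have h := (pv_keepA_iff c).1 hk
    simp only [pvLetterSpaceComma, List.mem_append, List.mem_cons, List.not_mem_nil, or_false]
    tauto
  simp [pvTranslate, hc, hmem]

theorem pv_translate_drop (c : Char) (hd : pvDomChar c = true) (hc : c ≠ ',')
    (hk : pvKeepA c = false) : pvTranslate c = none := by
  have h128 : c.toNat < 128 := by
    simp only [pvDomChar, Bool.or_eq_true, Bool.and_eq_true, decide_eq_true_eq, beq_iff_eq] at hd
    omega
  have hmem : c ∉ pvLetterSpaceComma := by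
    simp only [pvLetterSpaceComma, List.mem_append, List.mem_cons, List.not_mem_nil, or_false]
    intro hm
    have hkt : pvKeepA c = true := by
      rw [pv_keepA_iff]
      rcases hm with (h | h) | (h | h)
      · exact Or.inl h
      · exact Or.inr (Or.inr h)
      · exact Or.inr (Or.inl h)
      · exact absurd h hc
    simp [hkt] at hk
  simp [pvTranslate, hc, h128, hmem]

-- ---- B's cleaned row = A's filtered pieces joined by single spaces ----
theorem pv_filterMap_eq_join (cs : List Char) (h : ∀ c ∈ cs, pvDomChar c = true) :
    cs.filterMap pvTranslate
      = (pvSplitP cs).1.filter pvKeepA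
        ++ ((pvSplitP cs).2.map (fun p => ' ' :: p.filter pvKeepA)).flatten := by
  induction cs with
  | nil => simp [pvSplitP]
  | cons c cs ih =>
    have h' : ∀ d ∈ cs, pvDomChar d = true := fun d hd => h d (by simp [hd])
    rw [List.filterMap_cons]
    by_cases hc : c = ','
    · subst hc
      rw [show pvTranslate ',' = some ' ' from rfl, ih h']
      simp [pvSplitP]
    · by_cases hk : pvKeepA c = true
      · rw [pv_translate_keep c hc hk, ih h']
        simp [pvSplitP, hc, hk]
      · rw [pv_translate_drop c (h c (by simp)) hc (by simp [hk]), ih h']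
        simp [pvSplitP, hc, hk]

theorem pv_split₀_join (a : List Char) (ps : List (List Char)) :
    PySem.Chars.split₀ (a ++ (ps.map (fun p => ' ' :: p)).flatten)
      = PySem.Chars.split₀ a ++ (ps.map PySem.Chars.split₀).flatten := by
  induction ps generalizing a with
  | nil => simp
  | cons p ps ih =>
    simp only [List.map_cons, List.flatten_cons]
    rw [show a ++ ((' ' :: p) ++ (ps.map (fun q => ' ' :: q)).flatten)
          = a ++ ' ' :: (p ++ (ps.map (fun q => ' ' :: q)).flatten) by simp,
        pv_split₀_append_space, ih p]

-- ---- per-row equality, chars level ----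
theorem pv_row_eq (row : List Char) (h : ∀ c ∈ row, pvDomChar c = true) :
    (((pvSplitP row).1 :: (pvSplitP row).2).map
        (fun item => PySem.Chars.split₀ (item.filter pvKeepA))).flatten
      = PySem.Chars.split₀ (row.filterMap pvTranslate) := by
  rw [pv_filterMap_eq_join row h,
      show ((pvSplitP row).2.map (fun p => ' ' :: p.filter pvKeepA))
          = (((pvSplitP row).2.map (List.filter pvKeepA)).map (fun p => ' ' :: p)) by
        simp [List.map_map],
      pv_split₀_join]
  simp [List.map_map, Function.comp_def]

-- ===== VERDICT (by name: the statement is the Claim_ definition above) =====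
theorem pre_filter_spec : Claim_equal_pre_filter := by
  intro data hdom
  unfold Spec_pre_filter pre_filter pre_filter_alt
  have hstepA : ∀ (fd : List String) (row : String),
      (PySem.Chars.splitOn row.toList [',']).foldl (fun fd item =>
        let new_item := item.foldl (fun acc c => if pvKeepA c then acc ++ [c] else acc) ([] : List Char)
        let words := PySem.Chars.split₀ (PySem.Chars.strip new_item)
        words.foldl (fun fd2 x => fd2 ++ [String.ofList x]) fd) fd
      = fd ++ (PySem.Chars.splitOn row.toList [',']).flatMap
          (fun item => (PySem.Chars.split₀ (item.filter pvKeepA)).map String.ofList) := by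
    intro fd row
    rw [show (fun (fd : List String) (item : List Char) =>
        let new_item := item.foldl (fun acc c => if pvKeepA c then acc ++ [c] else acc) ([] : List Char)
        let words := PySem.Chars.split₀ (PySem.Chars.strip new_item)
        words.foldl (fun fd2 x => fd2 ++ [String.ofList x]) fd)
        = (fun fd item => fd ++ (PySem.Chars.split₀ (item.filter pvKeepA)).map String.ofList) by
      funext fd item
      show (PySem.Chars.split₀ (PySem.Chars.strip
          (item.foldl (fun acc c => if pvKeepA c then acc ++ [c] else acc) []))).foldl
            (fun fd2 x => fd2 ++ [String.ofList x]) fd = _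
      rw [show item.foldl (fun acc c => if pvKeepA c then acc ++ [c] else acc) ([] : List Char)
            = item.filter pvKeepA by
          simpa using PySem.List.foldl_append_if pvKeepA (fun c => c) item [],
        pv_split₀_strip, PySem.List.foldl_append_singleton_eq_map]]
    exact PySem.List.foldl_append_eq_flatMap _ _ fd
  rw [show (fun (filtered_data : List String) (row : String) =>
      (PySem.Chars.splitOn row.toList [',']).foldl (fun fd item =>
        let new_item := item.foldl (fun acc c => if pvKeepA c then acc ++ [c] else acc) ([] : List Char)
        let words := PySem.Chars.split₀ (PySem.Chars.strip new_item)
        words.foldl (fun fd2 x => fd2 ++ [String.ofList x]) fd) filtered_data)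
      = (fun fd row => fd ++ (PySem.Chars.splitOn row.toList [',']).flatMap
          (fun item => (PySem.Chars.split₀ (item.filter pvKeepA)).map String.ofList)) from
    funext₂ hstepA]
  rw [PySem.List.foldl_append_eq_flatMap _ data [], PySem.List.foldl_append_eq_flatMap _ data []]
  simp only [List.nil_append, List.flatMap_def]
  congr 1
  apply List.map_congr_left
  intro row hrow
  have hdchars : ∀ c ∈ row.toList, pvDomChar c = true := by
    have : pvDomStr row = true := by
      unfold Dom_pre_filter at hdom
      rw [List.all_eq_true] at hdom
      exact hdom row hrow
    simpa [pvDomStr, List.all_eq_true] using this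
  rw [pv_splitOn_comma]
  have := pv_row_eq row.toList hdchars
  calc (((pvSplitP row.toList).1 :: (pvSplitP row.toList).2).map
          (fun item => (PySem.Chars.split₀ (item.filter pvKeepA)).map String.ofList)).flatten
      = ((((pvSplitP row.toList).1 :: (pvSplitP row.toList).2).map
          (fun item => PySem.Chars.split₀ (item.filter pvKeepA))).flatten).map String.ofList := by
        simp [List.map_flatten, List.map_map, Function.comp_def]
    _ = (PySem.Chars.split₀ (row.toList.filterMap pvTranslate)).map String.ofList := by
        rw [this]
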